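-- pv_equiv track=rewrite | github.com/HuangZiliAndy/s3prl | s3prl/downstream/sep_ami/gen_rir.py | get_min_angle_diff
-- ===== SOURCE A (Python) =====
-- def angle_diff(a, b):
--     """in degrees"""
--     return min(abs(a - b), 360 - abs(a - b))
--
-- def get_min_angle_diff(azm_degrees):
--     """
--     Get the minimum angle difference between multiple sources
--     :param azm_degrees: [n_source]
--     :return
--         min_ad: scalar, the minimum angle difference between multiple sources,
--     """
--     min_ad = 181
--     if len(azm_degrees) <= 1:
--         return -1
--     for i in range(len(azm_degrees)):
--         for j in range(len(azm_degrees)):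
--             if i == j:
--                 continue
--             ad = angle_diff(azm_degrees[j], azm_degrees[i])
--             if ad <= min_ad:
--                 min_ad = ad
--     return min_ad
-- ===== SOURCE B (Python) =====
-- def get_min_angle_diff(azm_degrees):
--     if len(azm_degrees) <= 1:
--         return -1
--     s = sorted(azm_degrees)
--     gap = min(b - a for a, b in zip(s, s[1:]))
--     spread = s[-1] - s[0]
--     # angle_diff d = min(d, 360-d) is concave in d >= 0, so the minimum over
--     # all pairwise |differences| is attained at the smallest or largest one.
--     return min(min(gap, 360 - gap), min(spread, 360 - spread))
-- ===== Notes on version B (the rewrite author's own statement) =====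
-- stated objective: faster
-- what changed: Replaces A's O(n^2) all-pairs double loop by a single sort: since min(d, 360-d) is concave in the pairwise distance d, its minimum over all pairs is attained either at the smallest pairwise distance (the minimum adjacent gap of the sorted list) or at the largest one (max - min).
import Mathlib
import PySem

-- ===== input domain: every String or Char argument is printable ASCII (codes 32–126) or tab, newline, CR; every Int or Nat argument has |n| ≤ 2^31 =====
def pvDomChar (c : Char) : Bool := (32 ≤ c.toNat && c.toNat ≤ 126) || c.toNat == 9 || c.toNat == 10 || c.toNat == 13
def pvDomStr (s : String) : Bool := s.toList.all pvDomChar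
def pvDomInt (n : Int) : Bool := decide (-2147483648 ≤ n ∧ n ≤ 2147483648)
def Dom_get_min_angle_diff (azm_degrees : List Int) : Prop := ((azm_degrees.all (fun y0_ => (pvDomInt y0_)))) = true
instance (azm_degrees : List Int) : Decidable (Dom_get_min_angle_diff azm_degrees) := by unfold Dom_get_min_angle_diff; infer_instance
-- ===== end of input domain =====

-- B replaces A's O(n^2) all-pairs scan by one sort: min(d,360-d) over pairwise distances d
-- is attained at the smallest (min adjacent gap of the sorted list) or largest (max-min) distance.

-- ===== PORT A =====
def angle_diff (a b : Int) : Int := min |a - b| (360 - |a - b|)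

def get_min_angle_diff (azm_degrees : List Int) : Int :=
  if azm_degrees.length ≤ 1 then -1
  else
    (PySem.List.pyRange 0 (azm_degrees.length : Int) 1).foldl (fun min_ad i =>
      (PySem.List.pyRange 0 (azm_degrees.length : Int) 1).foldl (fun min_ad j =>
        if i == j then min_ad
        else
          let ad := angle_diff (PySem.List.pyGetD azm_degrees j 0) (PySem.List.pyGetD azm_degrees i 0)
          if ad ≤ min_ad then ad else min_ad) min_ad) 181

-- ===== PORT B =====
def get_min_angle_diff_alt (azm_degrees : List Int) : Int :=
  if azm_degrees.length ≤ 1 then -1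
  else
    let s := PySem.List.sorted azm_degrees (fun x => x) false
    -- min(generator) over the adjacent gaps; the .getD default is unreachable (s has ≥ 2 elements)
    let gap := (PySem.List.min? ((s.zip s.tail).map (fun p => p.2 - p.1)) (fun x => x)).getD 0
    let spread := PySem.List.pyGetD s (-1) 0 - PySem.List.pyGetD s 0 0
    min (min gap (360 - gap)) (min spread (360 - spread))

-- ===== PRECONDITION & SPEC =====
def Spec_get_min_angle_diff (azm_degrees : List Int) (out : Int) : Prop := out = get_min_angle_diff_alt azm_degrees
instance (azm_degrees : List Int) (out : Int) : Decidable (Spec_get_min_angle_diff azm_degrees out) := by unfold Spec_get_min_angle_diff; infer_instance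

-- ===== CLAIM (what is proved, stated in full; the proofs are below) =====
def Claim_equal_get_min_angle_diff : Prop := ∀ (azm_degrees : List Int), Dom_get_min_angle_diff azm_degrees → Spec_get_min_angle_diff azm_degrees (get_min_angle_diff azm_degrees)

-- ===== LEMMAS AND PROOFS =====

-- A's two loops, named for the proofs
def pvInner (xs : List Int) (i : Int) (L : List Int) (m : Int) : Int :=
  L.foldl (fun min_ad j =>
    if i == j then min_ad
    else
      let ad := angle_diff (PySem.List.pyGetD xs j 0) (PySem.List.pyGetD xs i 0)
      if ad ≤ min_ad then ad else min_ad) m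

def pvOuter (xs : List Int) (R L : List Int) (m : Int) : Int :=
  L.foldl (fun min_ad i => pvInner xs i R min_ad) m

lemma A_eq (xs : List Int) (h : ¬ xs.length ≤ 1) :
    get_min_angle_diff xs
      = pvOuter xs (PySem.List.pyRange 0 (xs.length : Int) 1) (PySem.List.pyRange 0 (xs.length : Int) 1) 181 := by
  simp [get_min_angle_diff, pvOuter, pvInner, h]

lemma pvInner_cons (xs : List Int) (i j : Int) (L : List Int) (m : Int) :
    pvInner xs i (j :: L) m
      = pvInner xs i L
          (if i == j then m
           else
             if angle_diff (PySem.List.pyGetD xs j 0) (PySem.List.pyGetD xs i 0) ≤ m then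
               angle_diff (PySem.List.pyGetD xs j 0) (PySem.List.pyGetD xs i 0)
             else m) := rfl

lemma inner_le_init (xs : List Int) (i : Int) (L : List Int) (m : Int) :
    pvInner xs i L m ≤ m := by
  induction L generalizing m with
  | nil => exact le_refl m
  | cons j L ih =>
    rw [pvInner_cons]
    refine le_trans (ih _) ?_
    split_ifs <;> omega

lemma inner_le (xs : List Int) (i : Int) (L : List Int) (m : Int) {j : Int}
    (hj : j ∈ L) (hij : i ≠ j) :
    pvInner xs i L m ≤ angle_diff (PySem.List.pyGetD xs j 0) (PySem.List.pyGetD xs i 0) := by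
  induction L generalizing m with
  | nil => cases hj
  | cons j' L ih =>
    rw [pvInner_cons]
    rcases List.mem_cons.mp hj with rfl | hj'
    · refine le_trans (inner_le_init xs i L _) ?_
      have : (i == j) = false := by simp [hij]
      rw [this]
      simp only [Bool.false_eq_true, if_false]
      split_ifs <;> omega
    · exact ih _ hj'

lemma inner_ge (xs : List Int) (i : Int) (L : List Int) (m c : Int)
    (h : ∀ j ∈ L, i ≠ j → c ≤ angle_diff (PySem.List.pyGetD xs j 0) (PySem.List.pyGetD xs i 0))
    (hm : c ≤ m) : c ≤ pvInner xs i L m := by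
  induction L generalizing m with
  | nil => exact hm
  | cons j L ih =>
    rw [pvInner_cons]
    refine ih _ (fun j' hj' hij' => h j' (List.mem_cons_of_mem _ hj') hij') ?_
    by_cases hij : i = j
    · simp [hij, hm]
    · have hb : (i == j) = false := by simp [hij]
      rw [hb]
      have := h j (List.mem_cons_self ..) hij
      simp only [Bool.false_eq_true, if_false]
      split_ifs <;> omega

lemma outer_le_init (xs : List Int) (R L : List Int) (m : Int) :
    pvOuter xs R L m ≤ m := by
  induction L generalizing m with
  | nil => exact le_refl m
  | cons i L ih =>
    exact le_trans (ih _) (inner_le_init xs i R m)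

lemma outer_le (xs : List Int) (R L : List Int) (m : Int) {i j : Int}
    (hi : i ∈ L) (hj : j ∈ R) (hij : i ≠ j) :
    pvOuter xs R L m ≤ angle_diff (PySem.List.pyGetD xs j 0) (PySem.List.pyGetD xs i 0) := by
  induction L generalizing m with
  | nil => cases hi
  | cons i' L ih =>
    rcases List.mem_cons.mp hi with rfl | hi'
    · exact le_trans (outer_le_init xs R L _) (inner_le xs i R m hj hij)
    · exact ih _ hi'

lemma outer_ge (xs : List Int) (R L : List Int) (m c : Int)
    (h : ∀ i ∈ L, ∀ j ∈ R, i ≠ j → c ≤ angle_diff (PySem.List.pyGetD xs j 0) (PySem.List.pyGetD xs i 0))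
    (hm : c ≤ m) : c ≤ pvOuter xs R L m := by
  induction L generalizing m with
  | nil => exact hm
  | cons i L ih =>
    refine ih _ (fun i' hi' => h i' (List.mem_cons_of_mem _ hi')) ?_
    exact inner_ge xs i R m c (h i (List.mem_cons_self ..)) hm

-- "a and b occur at two distinct positions of l" — transferable along permutations
def HasPair (l : List Int) (a b : Int) : Prop :=
  ∃ (p q : Nat) (hp : p < l.length) (hq : q < l.length), p ≠ q ∧ l[p] = a ∧ l[q] = b

lemma hasPair_iff (l : List Int) (a b : Int) :
    HasPair l a b ↔ a ∈ l ∧ b ∈ l ∧ (a ≠ b ∨ l.Duplicate a) := by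
  constructor
  · rintro ⟨p, q, hp, hq, hpq, rfl, rfl⟩
    refine ⟨List.getElem_mem hp, List.getElem_mem hq, ?_⟩
    by_cases hab : l[p] = l[q]
    · refine Or.inr (List.duplicate_iff_exists_distinct_get.mpr ?_)
      rcases Nat.lt_or_ge p q with h | h
      · exact ⟨⟨p, hp⟩, ⟨q, hq⟩, h, by simp, by simp [hab]⟩
      · have h' : q < p := by omega
        exact ⟨⟨q, hq⟩, ⟨p, hp⟩, h', by simp [hab], by simp⟩
    · exact Or.inl hab
  · rintro ⟨ha, hb, hab | hdup⟩
    · obtain ⟨p, hp, hpa⟩ := List.getElem_of_mem ha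
      obtain ⟨q, hq, hqb⟩ := List.getElem_of_mem hb
      exact ⟨p, q, hp, hq, fun h => hab (by subst h; rw [← hpa, ← hqb]), hpa, hqb⟩
    · by_cases hab : a = b
      · obtain ⟨n, m, hnm, hn, hm⟩ := List.duplicate_iff_exists_distinct_get.mp hdup
        have hnm' : (n : Nat) < (m : Nat) := hnm
        refine ⟨n, m, n.isLt, m.isLt, by omega, ?_, ?_⟩
        · simpa using hn.symm
        · rw [← hab]; simpa using hm.symm
      · obtain ⟨p, hp, hpa⟩ := List.getElem_of_mem ha
        obtain ⟨q, hq, hqb⟩ := List.getElem_of_mem hb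
        exact ⟨p, q, hp, hq, fun h => hab (by subst h; rw [← hpa, ← hqb]), hpa, hqb⟩

lemma hasPair_perm {l l' : List Int} (h : l.Perm l') {a b : Int} (hp : HasPair l a b) :
    HasPair l' a b := by
  rw [hasPair_iff] at hp ⊢
  rcases hp with ⟨h1, h2, h3⟩
  refine ⟨h.mem_iff.mp h1, h.mem_iff.mp h2, ?_⟩
  rcases h3 with h3 | h3
  · exact Or.inl h3
  · refine Or.inr ?_
    rw [List.duplicate_iff_two_le_count] at h3 ⊢
    rwa [← h.count_eq]

lemma sorted_mono (s : List Int) (hpw : s.Pairwise (· ≤ ·)) {p q : Nat}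
    (hpq : p ≤ q) (hq : q < s.length) : s[p]'(lt_of_le_of_lt hpq hq) ≤ s[q] := by
  rcases Nat.lt_or_ge p q with h | h
  · exact (List.pairwise_iff_getElem.mp hpw) p q _ hq h
  · have : p = q := le_antisymm hpq h
    subst this; exact le_refl _

lemma diff_bounds (s : List Int) (hpw : s.Pairwise (· ≤ ·)) (hs : 2 ≤ s.length) (g : Int)
    (hglb : ∀ (k : Nat) (hk : k + 1 < s.length), g ≤ s[k+1]'(by omega) - s[k]'(by omega))
    (p q : Nat) (hp : p < s.length) (hq : q < s.length) (hpq : p ≠ q) :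
    g ≤ |s[q] - s[p]| ∧ |s[q] - s[p]| ≤ s[s.length - 1]'(by omega) - s[0]'(by omega) := by
  have key : ∀ (u v : Nat) (hv : v < s.length) (huv : u < v),
      g ≤ s[v] - s[u]'(by omega) ∧ s[v] - s[u]'(by omega) ≤ s[s.length - 1]'(by omega) - s[0]'(by omega) := by
    intro u v hv huv
    have h1 : g ≤ s[u+1]'(by omega) - s[u]'(by omega) := hglb u (by omega)
    have h2 : s[u+1]'(by omega) ≤ s[v] := sorted_mono s hpw (by omega) hv
    have h3 : s[v] ≤ s[s.length - 1]'(by omega) := sorted_mono s hpw (by omega) (by omega)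
    have h4 : s[0]'(by omega) ≤ s[u]'(by omega) := sorted_mono s hpw (by omega) (by omega)
    omega
  rcases Nat.lt_or_ge p q with h | h
  · have hk := key p q hq h
    have hmono : s[p] ≤ s[q] := sorted_mono s hpw (le_of_lt h) hq
    rw [abs_of_nonneg (by omega)]
    omega
  · have hqp : q < p := by omega
    have hk := key q p hp hqp
    have hmono : s[q] ≤ s[p] := sorted_mono s hpw (le_of_lt hqp) hp
    rw [abs_of_nonpos (by omega), neg_sub]
    omega

-- ===== VERDICT (by name: the statement is the Claim_ definition above) =====
theorem get_min_angle_diff_spec : Claim_equal_get_min_angle_diff := by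
  intro xs _
  unfold Spec_get_min_angle_diff
  by_cases hlen : xs.length ≤ 1
  · simp [get_min_angle_diff, get_min_angle_diff_alt, hlen]
  · set s := PySem.List.sorted xs (fun x => x) false with hs_def
    have hperm : s.Perm xs := PySem.List.sorted_perm ..
    have hslen : s.length = xs.length := hperm.length_eq
    have h2 : 2 ≤ s.length := by omega
    have hpw : s.Pairwise (· ≤ ·) := by
      have := PySem.List.sorted_pairwise xs (fun x => x)
      simpa [← hs_def] using this
    set gaps := (s.zip s.tail).map (fun p => p.2 - p.1) with hgaps_def
    have hgaps_len : gaps.length = s.length - 1 := by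
      simp [hgaps_def]
    have hgaps_get : ∀ (k : Nat) (hk : k + 1 < s.length),
        gaps[k]'(by omega) = s[k+1]'(by omega) - s[k]'(by omega) := by
      intro k hk
      simp [hgaps_def, List.getElem_tail]
    obtain ⟨g, hg⟩ : ∃ g, PySem.List.min? gaps (fun x => x) = some g := by
      cases hmm : PySem.List.min? gaps (fun x => x) with
      | none =>
        have hnil : gaps = [] := (PySem.List.min?_eq_none_iff gaps (fun x => x)).mp hmm
        have := congrArg List.length hnil
        simp [hgaps_len] at this
        omega
      | some g => exact ⟨g, rfl⟩
    have hglb : ∀ (k : Nat) (hk : k + 1 < s.length), g ≤ s[k+1]'(by omega) - s[k]'(by omega) := by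
      intro k hk
      have hmem : gaps[k]'(by omega) ∈ gaps := List.getElem_mem (by omega)
      have hle := PySem.List.min?_isMin hg _ hmem
      simpa [hgaps_get k hk] using hle
    have hg0 : 0 ≤ g := by
      obtain ⟨k, hk1, hkeq⟩ := List.getElem_of_mem (PySem.List.min?_mem hg)
      have hk' : k + 1 < s.length := by omega
      have h1 := hgaps_get k hk'
      have h2' : s[k]'(by omega) ≤ s[k+1]'(by omega) := sorted_mono s hpw (by omega) (by omega)
      omega
    have hBeq : get_min_angle_diff_alt xs
        = min (min g (360 - g))
            (min (s[s.length - 1]'(by omega) - s[0]'(by omega))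
                 (360 - (s[s.length - 1]'(by omega) - s[0]'(by omega)))) := by
      rw [get_min_angle_diff_alt, if_neg hlen]
      simp only [← hs_def, ← hgaps_def, hg, Option.getD_some]
      rw [PySem.List.pyGetD_neg_ofNat s 1 0 (by omega) (by omega),
          PySem.List.pyGetD_eq_getElem s 0 (by omega) (by exact_mod_cast (by omega : (0:Int) < (s.length : Int)))]
      norm_num
    rw [A_eq xs hlen, hBeq]
    set R := PySem.List.pyRange 0 (xs.length : Int) 1 with hR
    apply le_antisymm
    · refine le_min ?_ ?_
      · -- the minimal adjacent gap is realized by a pair of distinct positions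
        obtain ⟨k, hk1, hkeq⟩ := List.getElem_of_mem (PySem.List.min?_mem hg)
        have hk' : k + 1 < s.length := by omega
        have hgk : g = s[k+1]'(by omega) - s[k]'(by omega) := by
          rw [← hgaps_get k hk', hkeq]
        obtain ⟨p, q, hp, hq, hpq, hpv, hqv⟩ :=
          hasPair_perm hperm (⟨k, k+1, by omega, by omega, by omega, rfl, rfl⟩ :
            HasPair s (s[k]'(by omega)) (s[k+1]'(by omega)))
        have hle := outer_le xs R R 181 (i := (p:Int)) (j := (q:Int))
          (by rw [hR, PySem.List.mem_pyRange_one]; omega)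
          (by rw [hR, PySem.List.mem_pyRange_one]; omega)
          (by omega)
        rw [PySem.List.pyGetD_eq_getElem xs 0 (by omega) (by exact_mod_cast (by omega : ((q:Int)) < (xs.length:Int))),
            PySem.List.pyGetD_eq_getElem xs 0 (by omega) (by exact_mod_cast (by omega : ((p:Int)) < (xs.length:Int)))] at hle
        simp only [Int.toNat_natCast] at hle
        rw [hpv, hqv] at hle
        unfold angle_diff at hle
        rw [show s[k+1]'(by omega) - s[k]'(by omega) = g from hgk.symm] at hle
        rwa [abs_of_nonneg hg0] at hle
      · -- the spread is realized by the first and last positions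
        obtain ⟨p, q, hp, hq, hpq, hpv, hqv⟩ :=
          hasPair_perm hperm (⟨0, s.length - 1, by omega, by omega, by omega, rfl, rfl⟩ :
            HasPair s (s[0]'(by omega)) (s[s.length - 1]'(by omega)))
        have hsp0 : s[0]'(by omega) ≤ s[s.length - 1]'(by omega) :=
          sorted_mono s hpw (by omega) (by omega)
        have hle := outer_le xs R R 181 (i := (p:Int)) (j := (q:Int))
          (by rw [hR, PySem.List.mem_pyRange_one]; omega)
          (by rw [hR, PySem.List.mem_pyRange_one]; omega)
          (by omega)
        rw [PySem.List.pyGetD_eq_getElem xs 0 (by omega) (by exact_mod_cast (by omega : ((q:Int)) < (xs.length:Int))),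
            PySem.List.pyGetD_eq_getElem xs 0 (by omega) (by exact_mod_cast (by omega : ((p:Int)) < (xs.length:Int)))] at hle
        simp only [Int.toNat_natCast] at hle
        rw [hpv, hqv] at hle
        unfold angle_diff at hle
        rwa [abs_of_nonneg (by omega)] at hle
    · apply outer_ge
      · intro i hi j hj hij
        rw [hR, PySem.List.mem_pyRange_one] at hi hj
        rw [PySem.List.pyGetD_eq_getElem xs 0 hj.1 hj.2,
            PySem.List.pyGetD_eq_getElem xs 0 hi.1 hi.2]
        have hpair : HasPair xs (xs[i.toNat]'(by omega)) (xs[j.toNat]'(by omega)) :=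
          ⟨i.toNat, j.toNat, by omega, by omega, by omega, rfl, rfl⟩
        obtain ⟨p, q, hp, hq, hpq, hpv, hqv⟩ := hasPair_perm hperm.symm hpair
        have hb := diff_bounds s hpw h2 g hglb p q hp hq hpq
        rw [hpv, hqv] at hb
        unfold angle_diff
        omega
      · omega
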